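-- pv_equiv track=rewrite | github.com/pcismyname/SF210 | recursive/even_digits.py | even_digits
-- ===== SOURCE A (Python) =====
-- def even_digits(num):
--     if num == 0:
--         return num
--     elif num < 0:
--         return -1*even_digits(abs(num))
--     if (num%10)%2 == 0:
--         return num%10 + 10*even_digits(num//10)
--     return even_digits(num//10)
-- ===== SOURCE B (Python) =====
-- def even_digits(num):
--     if num < 0:
--         return -even_digits(-num)
--     acc = 0
--     mult = 1
--     n = num
--     while n > 0:
--         d = n % 10
--         if d % 2 == 0:
--             acc += d * mult
--             mult *= 10
--         n //= 10
--     return acc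
-- ===== Notes on version B (the rewrite author's own statement) =====
-- stated objective: alternative
-- what changed: Replaces the value-building recursion (which reassembles even digits on the way back up via d + 10*rec) with a single iterative while loop that scans digits low-to-high, maintaining an accumulator and a place-value multiplier.
import Mathlib
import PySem

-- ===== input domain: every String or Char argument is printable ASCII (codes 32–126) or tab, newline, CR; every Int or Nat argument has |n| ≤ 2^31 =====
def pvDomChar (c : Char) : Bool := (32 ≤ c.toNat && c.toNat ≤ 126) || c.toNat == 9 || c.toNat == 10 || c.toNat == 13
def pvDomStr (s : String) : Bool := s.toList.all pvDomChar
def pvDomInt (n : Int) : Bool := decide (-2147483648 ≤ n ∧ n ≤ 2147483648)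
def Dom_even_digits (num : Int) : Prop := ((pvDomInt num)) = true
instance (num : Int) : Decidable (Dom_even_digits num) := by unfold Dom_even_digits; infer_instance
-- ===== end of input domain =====

-- B replaces A's value-building recursion with an iterative digit loop carrying an accumulator and place multiplier (alternative decomposition, same cost).


-- ===== PORT A =====
def even_digits (num : Int) : Int :=
  if num = 0 then num
  else if num < 0 then -1 * even_digits (Int.natAbs num)
  else if PySem.Int.mod (PySem.Int.mod num 10) 2 = 0 then
    PySem.Int.mod num 10 + 10 * even_digits (PySem.Int.floordiv num 10)
  else even_digits (PySem.Int.floordiv num 10)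
termination_by (2 * num.natAbs + if num < 0 then 1 else 0)
decreasing_by
  · simp only [Int.natAbs_natCast]
    split <;> omega
  all_goals
    rw [PySem.Int.floordiv_eq_ediv_of_pos (by omega : (0:Int) < 10)]
    split <;> omega

-- ===== PORT B =====
-- the while loop of Source B: state (n, acc, mult)
def evenDigitsLoop (n acc mult : Int) : Int :=
  if n > 0 then
    let d := PySem.Int.mod n 10
    if PySem.Int.mod d 2 = 0 then
      evenDigitsLoop (PySem.Int.floordiv n 10) (acc + d * mult) (mult * 10)
    else
      evenDigitsLoop (PySem.Int.floordiv n 10) acc mult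
  else acc
termination_by n.natAbs
decreasing_by
  all_goals
    rw [PySem.Int.floordiv_eq_ediv_of_pos (by omega : (0:Int) < 10)]
    omega

def even_digits_alt (num : Int) : Int :=
  if num < 0 then -(evenDigitsLoop (-num) 0 1) else evenDigitsLoop num 0 1

-- ===== PRECONDITION & SPEC =====
def Spec_even_digits (num : Int) (out : Int) : Prop := out = even_digits_alt num
instance (num : Int) (out : Int) : Decidable (Spec_even_digits num out) := by unfold Spec_even_digits; infer_instance

-- ===== CLAIM (what is proved, stated in full; the proofs are below) =====
def Claim_equal_even_digits : Prop := ∀ (num : Int), Dom_even_digits num → Spec_even_digits num (even_digits num)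

-- ===== LEMMAS AND PROOFS =====
theorem evenDigitsLoop_invariant : ∀ (k : Nat) (n acc mult : Int), n.natAbs = k → 0 ≤ n →
    evenDigitsLoop n acc mult = acc + mult * even_digits n := by
  intro k
  induction k using Nat.strong_induction_on with
  | _ k ih =>
    intro n acc mult hk hn
    rw [evenDigitsLoop]
    by_cases hpos : n > 0
    · have h10 := PySem.Int.floordiv_eq_ediv_of_pos (a := n) (b := 10) (by omega)
      have hlt : (PySem.Int.floordiv n 10).natAbs < k := by rw [h10]; omega
      rw [even_digits]
      simp only [if_pos hpos, if_neg (by omega : ¬ n = 0), if_neg (by omega : ¬ n < 0)]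
      by_cases hd : PySem.Int.mod (PySem.Int.mod n 10) 2 = 0
      · simp only [if_pos hd]
        rw [ih _ hlt _ _ _ rfl (by omega)]
        ring
      · simp only [if_neg hd]
        rw [ih _ hlt _ _ _ rfl (by omega)]
    · have h0 : n = 0 := by omega
      simp [h0, even_digits, hpos]

-- ===== VERDICT (by name: the statement is the Claim_ definition above) =====
theorem even_digits_spec : Claim_equal_even_digits := by
  intro num _
  unfold Spec_even_digits even_digits_alt
  by_cases hneg : num < 0
  · rw [even_digits]
    simp only [if_neg (by omega : ¬ num = 0), if_pos hneg, if_pos hneg]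
    rw [evenDigitsLoop_invariant (-num).natAbs (-num) 0 1 rfl (by omega)]
    have : ((Int.natAbs num : Nat) : Int) = -num := by omega
    rw [this]; ring
  · simp only [if_neg hneg]
    rw [evenDigitsLoop_invariant num.natAbs num 0 1 rfl (by omega)]
    ring
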